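-- pv_equiv track=rewrite | github.com/cognivore/openchessvision | src/openchessvision/recognition/local_cnn.py | _consolidate_fen_ranks
-- ===== SOURCE A (Python) =====
-- def _consolidate_fen_ranks(broken_fen: str) -> str:
--     """
--     Fix chessimg2pos output which uses '1' for each empty square
--     instead of properly consolidating consecutive empty squares.
--
--     Example: "pp11pppp" -> "pp2pppp"
--     """
--     def consolidate_rank(rank: str) -> str:
--         result = []
--         count = 0
--         for c in rank:
--             if c == '1':
--                 count += 1
--             else:
--                 if count > 0:
--                     result.append(str(count))
--                     count = 0
--                 result.append(c)
--         if count > 0: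
--             result.append(str(count))
--         return ''.join(result)
--
--     ranks = broken_fen.split('/')
--     return '/'.join(consolidate_rank(r) for r in ranks)
-- ===== SOURCE B (Python) =====
-- def _consolidate_fen_ranks(broken_fen: str) -> str:
--     # Single run-scanning pass over the whole string: a run of '1's never
--     # crosses a '/', so no split/join is needed.
--     out = []
--     i = 0
--     n = len(broken_fen)
--     while i < n:
--         c = broken_fen[i]
--         if c == '1':
--             j = i + 1
--             while j < n and broken_fen[j] == '1':
--                 j += 1
--             out.append(str(j - i))
--             i = j
--         else:
--             out.append(c)
--             i += 1
--     return ''.join(out)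
-- ===== Notes on version B (the rewrite author's own statement) =====
-- stated objective: simpler
-- what changed: Replaces the split('/')/per-rank counter-state fold/join('/') pipeline by one run-scanning pass over the whole string ('/' is never '1', so a run of empty squares cannot cross a rank boundary), emitting each '1'-run's length directly.
import Mathlib
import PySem

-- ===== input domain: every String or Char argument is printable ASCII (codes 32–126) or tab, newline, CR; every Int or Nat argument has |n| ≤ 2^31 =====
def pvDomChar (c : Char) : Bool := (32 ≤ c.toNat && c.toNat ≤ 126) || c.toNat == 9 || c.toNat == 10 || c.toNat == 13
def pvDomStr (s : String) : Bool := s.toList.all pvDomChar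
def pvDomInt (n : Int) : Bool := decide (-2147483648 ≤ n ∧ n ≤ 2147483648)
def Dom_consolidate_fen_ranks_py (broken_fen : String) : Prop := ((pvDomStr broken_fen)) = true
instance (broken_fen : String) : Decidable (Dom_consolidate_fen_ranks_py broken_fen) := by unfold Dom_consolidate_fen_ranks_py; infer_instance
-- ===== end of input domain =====

-- B replaces A's split('/')/per-rank fold/join('/') pipeline by one run-scanning pass
-- over the whole string (simpler; a '1'-run never crosses a '/').

-- ===== PORT A =====
-- the body of A's per-character loop: state = (result, count)
def pvStepA (st : List (List Char) × Int) (c : Char) : List (List Char) × Int :=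
  if c = '1' then (st.1, st.2 + 1)
  else
    let res := if st.2 > 0 then st.1 ++ [PySem.Int.toChars st.2] else st.1
    (res ++ [[c]], 0)

-- A's inner helper consolidate_rank
def pvConsolidateRank (rank : List Char) : List Char :=
  let st := rank.foldl pvStepA ([], 0)
  PySem.Chars.join [] (if st.2 > 0 then st.1 ++ [PySem.Int.toChars st.2] else st.1)

def consolidate_fen_ranks_py (broken_fen : String) : String :=
  let ranks := PySem.Chars.splitOn broken_fen.toList ['/']
  String.ofList (PySem.Chars.join ['/'] (ranks.map pvConsolidateRank))

-- ===== PORT B =====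
-- B's outer while loop; the inner while (scan to the end of the '1'-run) is the
-- takeWhile/dropWhile pair.
def pvAltGo : List Char → List Char
  | [] => []
  | c :: rest =>
    if c = '1' then
      PySem.Int.toChars (1 + ((rest.takeWhile (· = '1')).length : Int))
        ++ pvAltGo (rest.dropWhile (· = '1'))
    else c :: pvAltGo rest
termination_by l => l.length
decreasing_by
  · exact Nat.lt_succ_of_le (List.length_dropWhile_le _ _)
  · exact Nat.lt_succ_self _

def consolidate_fen_ranks_py_alt (broken_fen : String) : String :=
  String.ofList (pvAltGo broken_fen.toList)

-- ===== PRECONDITION & SPEC =====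
def Spec_consolidate_fen_ranks_py (broken_fen : String) (out : String) : Prop := out = consolidate_fen_ranks_py_alt broken_fen
instance (broken_fen : String) (out : String) : Decidable (Spec_consolidate_fen_ranks_py broken_fen out) := by unfold Spec_consolidate_fen_ranks_py; infer_instance

-- ===== CLAIM (what is proved, stated in full; the proofs are below) =====
def Claim_equal_consolidate_fen_ranks_py : Prop := ∀ (broken_fen : String), Dom_consolidate_fen_ranks_py broken_fen → Spec_consolidate_fen_ranks_py broken_fen (consolidate_fen_ranks_py broken_fen)

-- ===== LEMMAS AND PROOFS =====

-- takeWhile/dropWhile stop at an element failing the predicate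
theorem pv_takeWhile_append {p : Char → Bool} {y : Char} (hy : p y = false) :
    ∀ (xs ys : List Char), (xs ++ y :: ys).takeWhile p = xs.takeWhile p := by
  intro xs ys
  induction xs with
  | nil => simp [List.takeWhile, hy]
  | cons x xs ih => by_cases hx : p x <;> simp [List.takeWhile, hx, ih]

theorem pv_dropWhile_append {p : Char → Bool} {y : Char} (hy : p y = false) :
    ∀ (xs ys : List Char), (xs ++ y :: ys).dropWhile p = xs.dropWhile p ++ y :: ys := by
  intro xs ys
  induction xs with
  | nil => simp [List.dropWhile, hy]
  | cons x xs ih => by_cases hx : p x <;> simp [List.dropWhile, hx, ih]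

-- pvAltGo distributes over a '/'
theorem pv_altGo_append : ∀ (xs ys : List Char),
    pvAltGo (xs ++ '/' :: ys) = pvAltGo xs ++ '/' :: pvAltGo ys := by
  intro xs
  induction xs using pvAltGo.induct with
  | case1 =>
    intro ys
    simp [pvAltGo]
  | case2 rest ih =>
    intro ys
    rw [List.cons_append, pvAltGo, pvAltGo]
    rw [pv_takeWhile_append (by decide) rest ys, pv_dropWhile_append (by decide) rest ys, ih]
    simp
  | case3 c rest h ih =>
    intro ys
    rw [List.cons_append, pvAltGo, pvAltGo]
    simp only [if_neg h]
    rw [ih]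
    simp

-- appending one part to an intercalation
-- one unfolding step of intercalate
theorem pv_intercalate_cons (sep p q : List Char) (ps : List (List Char)) :
    List.intercalate sep (p :: q :: ps) = p ++ sep ++ List.intercalate sep (q :: ps) := by
  simp [List.intercalate]

theorem pv_intercalate_snoc (sep : List Char) :
    ∀ (ps : List (List Char)) (z : List Char),
    List.intercalate sep (ps ++ [z]) =
      List.intercalate sep ps ++ (if ps = [] then [] else sep) ++ z := by
  intro ps
  induction ps with
  | nil => intro z; simp [List.intercalate]
  | cons p ps ih =>
    intro z
    cases ps with
    | nil => simp [List.intercalate, List.intersperse]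
    | cons q ps' =>
      rw [List.cons_append, List.cons_append, pv_intercalate_cons, pv_intercalate_cons]
      have ih' := ih z
      rw [List.cons_append] at ih'
      rw [ih']
      simp

-- join ∘ splitOn = id  (single-char separator)
theorem pv_go_intercalate : ∀ (fuel : Nat) (l cur : List Char) (acc : List (List Char)),
    l.length ≤ fuel →
    List.intercalate ['/'] (PySem.Chars.splitOn.go ['/'] fuel l cur acc) =
      List.intercalate ['/'] ((cur.reverse :: acc).reverse) ++ l := by
  intro fuel
  induction fuel with
  | zero =>
    intro l cur acc hl
    have : l = [] := List.length_eq_zero_iff.mp (Nat.le_zero.mp hl)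
    subst this
    simp [PySem.Chars.splitOn.go]
  | succ fuel ih =>
    intro l cur acc hl
    cases l with
    | nil => simp [PySem.Chars.splitOn.go]
    | cons c rest =>
      rw [PySem.Chars.splitOn.go]
      by_cases hc : c = '/'
      · subst hc
        rw [if_pos (by simp)]
        simp only [List.length_cons] at hl
        rw [show (List.drop (List.length ['/']) ('/' :: rest)) = rest by simp]
        rw [ih rest [] (cur.reverse :: acc) (Nat.le_of_succ_le_succ hl)]
        rw [show (([] : List Char).reverse :: cur.reverse :: acc).reverse
              = (cur.reverse :: acc).reverse ++ [[]] by simp]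
        rw [pv_intercalate_snoc]
        simp
      · rw [if_neg (by simp [List.isPrefixOf]; exact Ne.symm hc)]
        simp only [List.length_cons] at hl
        rw [ih rest (c :: cur) acc (Nat.le_of_succ_le_succ hl)]
        rw [show ((c :: cur).reverse :: acc).reverse = acc.reverse ++ [cur.reverse ++ [c]] by simp,
            show (cur.reverse :: acc).reverse = acc.reverse ++ [cur.reverse] by simp]
        rw [pv_intercalate_snoc, pv_intercalate_snoc]
        simp

theorem pv_join_splitOn (cs : List Char) :
    List.intercalate ['/'] (PySem.Chars.splitOn cs ['/']) = cs := by
  unfold PySem.Chars.splitOn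
  rw [pv_go_intercalate (cs.length + 1) cs [] [] (Nat.le_succ _)]
  simp [List.intercalate]

-- pvAltGo distributes over an intercalation by '/'
theorem pv_altGo_intercalate : ∀ (ps : List (List Char)),
    pvAltGo (List.intercalate ['/'] ps) = List.intercalate ['/'] (ps.map pvAltGo) := by
  intro ps
  induction ps with
  | nil => simp [List.intercalate, pvAltGo]
  | cons p ps ih =>
    cases ps with
    | nil => simp [List.intercalate, List.intersperse]
    | cons q ps' =>
      rw [pv_intercalate_cons]
      simp only [List.map_cons]
      rw [pv_intercalate_cons]
      rw [show p ++ ['/'] ++ List.intercalate ['/'] (q :: ps')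
            = p ++ '/' :: List.intercalate ['/'] (q :: ps') by simp]
      rw [pv_altGo_append, ih]
      simp

-- A's rank fold computes pvAltGo (one rank)
theorem pv_join_nil_flatten : ∀ (ps : List (List Char)), PySem.Chars.join [] ps = ps.flatten := by
  intro ps
  unfold PySem.Chars.join
  induction ps with
  | nil => simp [List.intercalate]
  | cons p ps ih =>
    cases ps with
    | nil => simp [List.intercalate, List.intersperse]
    | cons q ps' => rw [pv_intercalate_cons, ih]; simp

theorem pv_tw_rep (j : Nat) : (List.replicate j '1').takeWhile (· = '1') = List.replicate j '1' := by
  induction j with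
  | zero => rfl
  | succ j ih => simp [List.replicate_succ, ih]

theorem pv_dw_rep (j : Nat) : (List.replicate j '1').dropWhile (· = '1') = [] := by
  induction j with
  | zero => rfl
  | succ j ih => simp [List.replicate_succ, ih]

theorem pv_altGo_ones_nil (j : Nat) :
    pvAltGo (List.replicate j '1') = if j = 0 then [] else PySem.Int.toChars (j : Int) := by
  cases j with
  | zero => simp [pvAltGo]
  | succ j =>
    rw [List.replicate_succ, pvAltGo]
    simp only [pv_tw_rep, pv_dw_rep, List.length_replicate]
    rw [show pvAltGo [] = [] by simp [pvAltGo]]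
    simp only [Nat.succ_ne_zero]
    rw [show (1 + (j : Int)) = ((j + 1 : Nat) : Int) by push_cast; ring]
    simp

theorem pv_altGo_ones (j : Nat) (c : Char) (hc : ¬ c = '1') (l : List Char) :
    pvAltGo (List.replicate j '1' ++ c :: l) =
      (if j = 0 then [] else PySem.Int.toChars (j : Int)) ++ c :: pvAltGo l := by
  cases j with
  | zero =>
    rw [List.replicate_zero, List.nil_append, pvAltGo]
    simp [hc]
  | succ j =>
    rw [List.replicate_succ, List.cons_append, pvAltGo]
    rw [pv_takeWhile_append (by simpa using hc) _ l, pv_dropWhile_append (by simpa using hc) _ l,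
        pv_tw_rep, pv_dw_rep, List.length_replicate, List.nil_append]
    rw [pvAltGo]
    simp only [if_neg hc, Nat.succ_ne_zero]
    rw [show (1 + (j : Int)) = ((j + 1 : Nat) : Int) by push_cast; ring]
    simp

theorem pv_rank_fold : ∀ (l : List Char) (res : List (List Char)) (k : Nat),
    PySem.Chars.join []
        (let st := l.foldl pvStepA (res, (k : Int))
         if st.2 > 0 then st.1 ++ [PySem.Int.toChars st.2] else st.1) =
      PySem.Chars.join [] res ++ pvAltGo (List.replicate k '1' ++ l) := by
  intro l
  induction l with
  | nil =>
    intro res k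
    simp only [List.foldl_nil, List.append_nil]
    rw [pv_altGo_ones_nil, pv_join_nil_flatten, pv_join_nil_flatten]
    by_cases hk : k = 0
    · subst hk; simp
    · rw [if_pos (by exact_mod_cast Nat.pos_of_ne_zero hk), if_neg hk]
      simp
  | cons c l ih =>
    intro res k
    by_cases hc : c = '1'
    · subst hc
      rw [List.foldl_cons]
      rw [show pvStepA (res, (k : Int)) '1' = (res, ((k + 1 : Nat) : Int)) by
            simp [pvStepA]]
      rw [ih res (k + 1)]
      rw [show List.replicate k '1' ++ '1' :: l = List.replicate (k + 1) '1' ++ l by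
            rw [List.replicate_succ']; simp]
    · rw [List.foldl_cons]
      by_cases hk : k = 0
      · subst hk
        rw [show pvStepA (res, ((0 : Nat) : Int)) c = (res ++ [[c]], ((0 : Nat) : Int)) by
              simp [pvStepA, hc]]
        rw [ih (res ++ [[c]]) 0, pv_join_nil_flatten, pv_join_nil_flatten]
        rw [List.replicate_zero, List.nil_append, List.nil_append, pvAltGo]
        simp [hc]
      · rw [show pvStepA (res, (k : Int)) c
              = (res ++ [PySem.Int.toChars (k : Int), [c]], ((0 : Nat) : Int)) by
              simp only [pvStepA, if_neg hc]
              rw [if_pos (by exact_mod_cast Nat.pos_of_ne_zero hk)]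
              simp]
        rw [ih _ 0, pv_join_nil_flatten, pv_join_nil_flatten]
        rw [List.replicate_zero, List.nil_append, pv_altGo_ones k c hc l, if_neg hk]
        simp

theorem pv_rank_eq (rank : List Char) : pvConsolidateRank rank = pvAltGo rank := by
  unfold pvConsolidateRank
  have := pv_rank_fold rank [] 0
  simp only [Nat.cast_zero, List.replicate_zero, List.nil_append] at this
  rw [this, pv_join_nil_flatten]
  simp

-- ===== VERDICT (by name: the statement is the Claim_ definition above) =====
theorem consolidate_fen_ranks_py_spec : Claim_equal_consolidate_fen_ranks_py := by
  intro s _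
  unfold Spec_consolidate_fen_ranks_py consolidate_fen_ranks_py consolidate_fen_ranks_py_alt
  have h : PySem.Chars.join ['/'] ((PySem.Chars.splitOn s.toList ['/']).map pvConsolidateRank)
      = pvAltGo s.toList := by
    unfold PySem.Chars.join
    have hm : (PySem.Chars.splitOn s.toList ['/']).map pvConsolidateRank
        = (PySem.Chars.splitOn s.toList ['/']).map pvAltGo := by
      exact List.map_congr_left (fun p _ => pv_rank_eq p)
    rw [hm, ← pv_altGo_intercalate, pv_join_splitOn]
  exact congrArg String.ofList h
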